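-- pv_equiv track=rewrite | github.com/alexisiddiqui/Multiple-Ligand-Alignment | examples/LOSO/B_Neff_Bfactors/01_fetch_pdb_ligands.py | extract_ligand_pdb_block
-- ===== SOURCE A (Python) =====
-- def extract_ligand_pdb_block(pdb_text: str, comp_ids: list[str]) -> dict:
--     """Extract only the HETATM lines for the specific comp_id."""
--     # Sometimes a PDB might have multiple valid ligands, we'll take the first one found in the structure
--     ligand_blocks = {}
--
--     for comp_id in comp_ids:
--         block_lines = []
--         for line in pdb_text.splitlines():
--             # HETATM records
--             if line.startswith("HETATM"):
--                 # The resName is in columns 18-20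
--                 res_name = line[17:20].strip()
--                 if res_name == comp_id:
--                     block_lines.append(line)
--         if block_lines:
--             ligand_blocks[comp_id] = "\n".join(block_lines)
--
--     return ligand_blocks
-- ===== SOURCE B (Python) =====
-- def extract_ligand_pdb_block(pdb_text: str, comp_ids: list[str]) -> dict:
--     """Single pass: split once, bucket HETATM lines by res_name, assemble in comp_ids order."""
--     buckets = {}
--     for line in pdb_text.splitlines():
--         if line.startswith("HETATM"):
--             buckets.setdefault(line[17:20].strip(), []).append(line)
--     result = {}
--     for comp_id in comp_ids:
--         if comp_id in buckets:
--             result[comp_id] = "\n".join(buckets[comp_id])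
--     return result
-- ===== Notes on version B (the rewrite author's own statement) =====
-- stated objective: faster
-- what changed: B splits the text once and buckets HETATM lines by res_name in a single pass over the lines, then assembles the result in comp_ids order, instead of A's rescan of all lines for every comp_id.
import Mathlib
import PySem

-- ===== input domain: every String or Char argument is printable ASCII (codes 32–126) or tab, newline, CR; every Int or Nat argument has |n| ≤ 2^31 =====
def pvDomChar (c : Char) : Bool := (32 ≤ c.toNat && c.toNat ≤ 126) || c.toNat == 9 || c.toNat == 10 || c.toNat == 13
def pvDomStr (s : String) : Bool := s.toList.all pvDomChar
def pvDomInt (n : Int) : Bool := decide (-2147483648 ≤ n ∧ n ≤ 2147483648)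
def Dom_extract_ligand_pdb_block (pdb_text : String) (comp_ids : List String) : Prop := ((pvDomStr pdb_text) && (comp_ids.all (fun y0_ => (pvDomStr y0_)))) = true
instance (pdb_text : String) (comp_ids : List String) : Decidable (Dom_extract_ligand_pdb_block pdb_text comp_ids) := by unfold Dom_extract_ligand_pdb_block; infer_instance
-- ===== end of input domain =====

-- B splits the text once and buckets HETATM lines by res_name in a single pass (O(n+k))
-- instead of A's rescan of every line for every comp_id (O(k·n)); objective: faster.

-- ===== PORT A =====
def extract_ligand_pdb_block (pdb_text : String) (comp_ids : List String) : List (String × String) :=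
  (comp_ids.foldl
    (fun (ligand_blocks : PySem.Dict String String) comp_id =>
      let block_lines :=
        (PySem.Str.splitlines pdb_text).foldl
          (fun block_lines line =>
            if PySem.Str.startswith line "HETATM" then
              -- res_name = line[17:20].strip()
              if PySem.Str.strip (PySem.Str.slice line (some 17) (some 20)) == comp_id then
                block_lines ++ [line]
              else block_lines
            else block_lines)
          []
      if block_lines.isEmpty then ligand_blocks
      else ligand_blocks.insert comp_id (PySem.Str.join "\n" block_lines))
    PySem.Dict.empty).items

-- ===== PORT B =====
def extract_ligand_pdb_block_alt (pdb_text : String) (comp_ids : List String) : List (String × String) :=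
  let buckets :=
    (PySem.Str.splitlines pdb_text).foldl
      (fun (buckets : PySem.Dict String (List String)) line =>
        if PySem.Str.startswith line "HETATM" then
          -- buckets.setdefault(res_name, []).append(line)
          buckets.modify (PySem.Str.strip (PySem.Str.slice line (some 17) (some 20))) []
            (fun b => b ++ [line])
        else buckets)
      PySem.Dict.empty
  (comp_ids.foldl
    (fun (result : PySem.Dict String String) comp_id =>
      if buckets.contains comp_id then
        result.insert comp_id (PySem.Str.join "\n" (buckets.getD comp_id []))
      else result)
    PySem.Dict.empty).items

-- ===== PRECONDITION & SPEC =====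
def Spec_extract_ligand_pdb_block (pdb_text : String) (comp_ids : List String) (out : List (String × String)) : Prop := out = extract_ligand_pdb_block_alt pdb_text comp_ids
instance (pdb_text : String) (comp_ids : List String) (out : List (String × String)) : Decidable (Spec_extract_ligand_pdb_block pdb_text comp_ids out) := by unfold Spec_extract_ligand_pdb_block; infer_instance

-- ===== CLAIM (what is proved, stated in full; the proofs are below) =====
def Claim_equal_extract_ligand_pdb_block : Prop := ∀ (pdb_text : String) (comp_ids : List String), Dom_extract_ligand_pdb_block pdb_text comp_ids → Spec_extract_ligand_pdb_block pdb_text comp_ids (extract_ligand_pdb_block pdb_text comp_ids)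

-- ===== LEMMAS AND PROOFS =====

-- res_name of a line (proof-side abbreviation)
def pvKey (line : String) : String :=
  PySem.Str.strip (PySem.Str.slice line (some 17) (some 20))

def pvHet (line : String) : Bool := PySem.Str.startswith line "HETATM"

-- A's inner loop collects exactly the matching lines, in order
theorem a_inner_filter (lines : List String) (cid : String) (acc : List String) :
    lines.foldl
      (fun block_lines line =>
        if pvHet line then
          if pvKey line == cid then block_lines ++ [line] else block_lines
        else block_lines) acc
    = acc ++ lines.filter (fun l => pvHet l && (pvKey l == cid)) := by
  induction lines generalizing acc with
  | nil => simp
  | cons l rest ih =>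
    rw [List.foldl_cons, ih]
    by_cases h1 : pvHet l
    · by_cases h2 : pvKey l == cid
      · simp [h1, h2]
      · simp [h1, h2]
    · simp [h1]

-- B's bucket for cid holds exactly the matching lines, in order
theorem b_bucket_getD (lines : List String) (d : PySem.Dict String (List String)) (cid : String) :
    (lines.foldl
      (fun (buckets : PySem.Dict String (List String)) line =>
        if pvHet line then buckets.modify (pvKey line) [] (fun b => b ++ [line]) else buckets) d).getD cid []
    = d.getD cid [] ++ lines.filter (fun l => pvHet l && (pvKey l == cid)) := by
  induction lines generalizing d with
  | nil => simp
  | cons l rest ih =>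
    rw [List.foldl_cons, ih]
    by_cases h1 : pvHet l
    · rw [if_pos h1, PySem.Dict.getD_modify]
      by_cases h2 : pvKey l == cid
      · have : cid = pvKey l := (eq_of_beq h2).symm
        simp [h1, this]
      · have : ¬ cid = pvKey l := fun h => h2 (by simp [h])
        simp [h1, h2, this]
    · simp [h1]

-- B's bucket contains cid iff some line matches
theorem b_bucket_contains (lines : List String) (d : PySem.Dict String (List String)) (cid : String) :
    (lines.foldl
      (fun (buckets : PySem.Dict String (List String)) line =>
        if pvHet line then buckets.modify (pvKey line) [] (fun b => b ++ [line]) else buckets) d).contains cid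
    = (d.contains cid || lines.any (fun l => pvHet l && (pvKey l == cid))) := by
  induction lines generalizing d with
  | nil => simp
  | cons l rest ih =>
    rw [List.foldl_cons, ih]
    by_cases h1 : pvHet l
    · rw [if_pos h1, PySem.Dict.contains_modify]
      by_cases h2 : pvKey l == cid
      · have hc : (cid == pvKey l) = true := by simp [eq_of_beq h2]
        simp [h1, h2, hc]
      · have hc : (cid == pvKey l) = false := by
          simp only [beq_eq_false_iff_ne, ne_eq]
          exact fun h => h2 (by simp [h])
        simp [h1, h2, hc]
    · rw [if_neg h1]
      simp [h1]

-- ===== VERDICT (by name: the statement is the Claim_ definition above) =====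
theorem extract_ligand_pdb_block_spec : Claim_equal_extract_ligand_pdb_block := by
  intro pdb_text comp_ids _
  unfold Spec_extract_ligand_pdb_block extract_ligand_pdb_block extract_ligand_pdb_block_alt
  congr 1
  apply PySem.List.foldl_congr_mem
  intro d cid _
  have hA := a_inner_filter (PySem.Str.splitlines pdb_text) cid []
  have hB1 := b_bucket_getD (PySem.Str.splitlines pdb_text) PySem.Dict.empty cid
  have hB2 := b_bucket_contains (PySem.Str.splitlines pdb_text) PySem.Dict.empty cid
  simp only [pvHet, pvKey, List.nil_append, PySem.Dict.getD_empty, PySem.Dict.contains_empty,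
    Bool.false_or] at hA hB1 hB2
  simp at hA hB1 hB2
  simp [hA, hB1, hB2, List.isEmpty_iff]
  split_ifs with h1 h2 h3
  · -- block empty but a matching line exists: contradiction
    exfalso
    obtain ⟨x, hx, hs, hk⟩ := h2
    exact h1 x hx hs hk
  · rfl
  · rfl
  · -- block nonempty but no matching line: contradiction
    exfalso
    exact h1 fun a ha hs hk => h3 ⟨a, ha, hs, hk⟩
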